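-- pv_equiv track=rewrite | github.com/SpicySourBagel/engsci2t7 | esc180/project 2/gomoku.py | better_detect_rows
-- ===== SOURCE A (Python) =====
-- def is_bounded(board, y_end, x_end, length, d_y, d_x):
--     y_start = y_end - d_y * (length - 1)
--     x_start = x_end - d_x * (length - 1)
--     col = board[y_end][x_end]
--     start_type = ""
--     end_type = ""
--
--     # test the value after the end square
--     if y_end + d_y < 0 or y_end + d_y >= len(board) or x_end + d_x < 0 or x_end + d_x >= len(board[0]):  # first tests if it is in the board
--         end_type = "edge"
--     else:  # means in board, need this otherwise might be an index error
--         end_type = board[y_end + d_y][x_end + d_x]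
--
--     # test the value before the start square
--     if y_start - d_y < 0 or y_start - d_y >= len(board) or x_start - d_x < 0 or x_start - d_x >= len(board[0]):
--         start_type = "edge"
--     else:
--         start_type = board[y_start - d_y][x_start - d_x]
--
--     if start_type == col or end_type == col:  # test if sequence is complete or not
--         return None
--
--     if start_type == " " and end_type == " ":
--         return "OPEN"
--     elif start_type == " " or end_type == " ":  # can do this cause scenario with both is tested before this
--         return "SEMIOPEN"
--     else:
--         return "CLOSED"
--
-- def better_detect_row(board, col, y_start, x_start, length, d_y, d_x):
--     open_seq_count = 0
--     semi_open_seq_count = 0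
--     closed_seq_count = 0
--     y = y_start
--     x = x_start
--     seq_len = 0
--
--     while 0 <= y < len(board) and 0 <= x < len(board[0]):
--         if board[y][x] == col:
--             seq_len += 1
--             if seq_len == length:
--                     if is_bounded(board, y, x, length, d_y, d_x) == "OPEN":
--                         open_seq_count += 1
--                     elif is_bounded(board, y, x, length, d_y, d_x) == "SEMIOPEN":
--                         semi_open_seq_count += 1
--                     else:
--                         closed_seq_count += 1  # has to be closed
--         else:
--             seq_len = 0  # means that it is not connected
--         y += d_y
--         x += d_x  # next element in row R
--
--     return (open_seq_count, semi_open_seq_count, closed_seq_count)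
--
-- def better_detect_rows(board, col, length):
--     '''also returns the closed ones, and returns everything in a list'''
--     open_seq_count = 0
--     semi_open_seq_count = 0
--     closed_seq_count = 0
--
--     # up/down
--     for i in range(len(board)):
--         res_1 = better_detect_row(board, col, 0 , i, length, 1, 0)
--         open_seq_count += res_1[0]
--         semi_open_seq_count += res_1[1]
--         closed_seq_count += res_1[2]
--
--     # side/side
--     for i in range(len(board)):
--         res_2 = better_detect_row(board, col, i , 0, length, 0, 1)
--         open_seq_count += res_2[0]
--         semi_open_seq_count += res_2[1]
--         closed_seq_count += res_2[2]
--
--     # top left to bottom right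
--     for i in range(len(board[0])):
--         res_3 = better_detect_row(board, col, 0 , i, length, 1, 1)
--         open_seq_count += res_3[0]
--         semi_open_seq_count += res_3[1]
--         closed_seq_count += res_3[2]
--     for k in range(1, len(board)):
--         res_4 = better_detect_row(board, col, k, 0, length, 1, 1)
--         open_seq_count += res_4[0]
--         semi_open_seq_count += res_4[1]
--         closed_seq_count += res_4[2]
--
--     # bottom left to top right
--     for i in range(len(board[0])):
--         res_5 = better_detect_row(board, col, 0, i, length, 1, -1)
--         open_seq_count += res_5[0]
--         semi_open_seq_count += res_5[1]
--         closed_seq_count += res_5[2]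
--     for k in range(1, len(board)):
--         res_6 = better_detect_row(board, col, k, len(board[0]) - 1, length, 1, -1)
--         open_seq_count += res_6[0]
--         semi_open_seq_count += res_6[1]
--         closed_seq_count += res_6[2]
--
--     return [open_seq_count, semi_open_seq_count, closed_seq_count]
-- ===== SOURCE B (Python) =====
-- def better_detect_rows(board, col, length):
--     '''also returns the closed ones, and returns everything in a list'''
--     if length < 1:
--         return [0, 0, 0]
--     n = len(board)
--     m = len(board[0])
--
--     def line(y, x, dy, dx):
--         cells = []
--         while 0 <= y < n and 0 <= x < m:
--             cells.append(board[y][x])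
--             y += dy
--             x += dx
--         return cells
--
--     lines = []
--     for i in range(n):
--         lines.append(line(0, i, 1, 0))        # up/down
--     for i in range(n):
--         lines.append(line(i, 0, 0, 1))        # side/side
--     for i in range(m):
--         lines.append(line(0, i, 1, 1))        # top-left to bottom-right
--     for k in range(1, n):
--         lines.append(line(k, 0, 1, 1))
--     for i in range(m):
--         lines.append(line(0, i, 1, -1))       # bottom-left to top-right
--     for k in range(1, n):
--         lines.append(line(k, m - 1, 1, -1))
--
--     open_c = semi_c = closed_c = 0
--     for cells in lines:
--         ln = len(cells)
--         prev = None          # cell just before the current position (None = off the line)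
--         i = 0
--         while i < ln:
--             c = cells[i]
--             if c != col:
--                 prev = c
--                 i += 1
--                 continue
--             j = i + 1
--             while j < ln and cells[j] == col:
--                 j += 1
--             run = j - i                      # maximal run of col starting at i
--             after = cells[j] if j < ln else None
--             if run > length:
--                 closed_c += 1                # longer runs count once, as closed
--             elif run == length:
--                 if prev == " " and after == " ":
--                     open_c += 1
--                 elif prev == " " or after == " ":
--                     semi_c += 1
--                 else:
--                     closed_c += 1
--             prev = col
--             i = j
--     return [open_c, semi_c, closed_c]
-- ===== Notes on version B (the rewrite author's own statement) =====
-- stated objective: alternative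
-- what changed: Instead of A's incremental seq_len counter that re-derives run boundaries from board coordinates via is_bounded at the moment the counter hits `length`, B materialises each of the six families of lines as a list of cells and classifies maximal runs of `col` in one run-based scan per line (run > length counts once as closed; run == length is classified open/semiopen/closed from the cells adjacent to the run, off-line = edge).
-- outside the precondition, e.g. on better_detect_rows([['edge', 'edge', ' ']], 'edge', 2): A returns [0, 0, 1], B returns [0, 1, 0]
import Mathlib
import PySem

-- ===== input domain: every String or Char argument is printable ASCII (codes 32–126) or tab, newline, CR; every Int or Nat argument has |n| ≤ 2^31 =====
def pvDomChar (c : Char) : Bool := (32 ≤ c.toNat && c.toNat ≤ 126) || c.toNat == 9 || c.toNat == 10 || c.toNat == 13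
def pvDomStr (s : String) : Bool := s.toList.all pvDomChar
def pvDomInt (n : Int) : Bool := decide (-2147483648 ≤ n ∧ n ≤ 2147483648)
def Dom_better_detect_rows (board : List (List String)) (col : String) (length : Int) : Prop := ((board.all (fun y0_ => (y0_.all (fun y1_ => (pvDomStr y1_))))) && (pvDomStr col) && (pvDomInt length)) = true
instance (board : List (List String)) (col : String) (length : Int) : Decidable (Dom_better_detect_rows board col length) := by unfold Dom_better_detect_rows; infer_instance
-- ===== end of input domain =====

-- B replaces A's incremental seq_len/is_bounded counter by gathering each line of the
-- board and classifying maximal runs of `col` per line (alternative decomposition, same cost).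


-- ===== PORT A =====
-- board[y][x]; every use below is in range under Pre_better_detect_rows, so the defaults are never read
def pvCell (board : List (List String)) (y x : Int) : String :=
  (PySem.List.pyGet? ((PySem.List.pyGet? board y).getD []) x).getD ""

-- len(board[0]) (board is nonempty under Pre_better_detect_rows)
def pvRowLen (board : List (List String)) : Int :=
  ((PySem.List.pyGetD board 0 ([] : List String)).length : Int)

-- [o, s, c] from the three counters (both entry points return the counters this way)
def pvOut (t : Int × Int × Int) : List Int := [t.1, t.2.1, t.2.2]

-- is_bounded(board, y_end, x_end, length, d_y, d_x); none = Python's None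
def pvIsBounded (board : List (List String)) (y_end x_end length d_y d_x : Int) : Option String :=
  let y_start := y_end - d_y * (length - 1)
  let x_start := x_end - d_x * (length - 1)
  let colv := pvCell board y_end x_end
  let end_type : String :=
    if y_end + d_y < 0 ∨ y_end + d_y ≥ (board.length : Int) ∨ x_end + d_x < 0 ∨ x_end + d_x ≥ pvRowLen board
    then "edge" else pvCell board (y_end + d_y) (x_end + d_x)
  let start_type : String :=
    if y_start - d_y < 0 ∨ y_start - d_y ≥ (board.length : Int) ∨ x_start - d_x < 0 ∨ x_start - d_x ≥ pvRowLen board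
    then "edge" else pvCell board (y_start - d_y) (x_start - d_x)
  if start_type = colv ∨ end_type = colv then none
  else if start_type = " " ∧ end_type = " " then some "OPEN"
  else if start_type = " " ∨ end_type = " " then some "SEMIOPEN"
  else some "CLOSED"

-- better_detect_row's while loop; fuel n+m+1 always outlasts the loop at the call sites below
def pvRow (board : List (List String)) (col : String) (length d_y d_x : Int) :
    Nat → Int → Int → Int → Int × Int × Int
  | 0, _, _, _ => (0, 0, 0)
  | fuel + 1, y, x, sl =>
    if 0 ≤ y ∧ y < (board.length : Int) ∧ 0 ≤ x ∧ x < pvRowLen board then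
      if pvCell board y x = col then
        let sl' := sl + 1
        let inc : Int × Int × Int :=
          if sl' = length then
            if pvIsBounded board y x length d_y d_x = some "OPEN" then (1, 0, 0)
            else if pvIsBounded board y x length d_y d_x = some "SEMIOPEN" then (0, 1, 0)
            else (0, 0, 1)
          else (0, 0, 0)
        inc + pvRow board col length d_y d_x fuel (y + d_y) (x + d_x) sl'
      else pvRow board col length d_y d_x fuel (y + d_y) (x + d_x) 0
    else (0, 0, 0)

def better_detect_rows (board : List (List String)) (col : String) (length : Int) : List Int :=
  let m := (PySem.List.pyGetD board 0 ([] : List String)).length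
  let fuel := board.length + m + 1
  let t1 := (List.range board.length).foldl
    (fun acc (i : Nat) => acc + pvRow board col length 1 0 fuel 0 (i : Int) 0) ((0, 0, 0) : Int × Int × Int)
  let t2 := (List.range board.length).foldl
    (fun acc (i : Nat) => acc + pvRow board col length 0 1 fuel (i : Int) 0 0) t1
  let t3 := (List.range m).foldl
    (fun acc (i : Nat) => acc + pvRow board col length 1 1 fuel 0 (i : Int) 0) t2
  let t4 := (List.range' 1 (board.length - 1)).foldl
    (fun acc (k : Nat) => acc + pvRow board col length 1 1 fuel (k : Int) 0 0) t3
  let t5 := (List.range m).foldl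
    (fun acc (i : Nat) => acc + pvRow board col length 1 (-1) fuel 0 (i : Int) 0) t4
  let t6 := (List.range' 1 (board.length - 1)).foldl
    (fun acc (k : Nat) => acc + pvRow board col length 1 (-1) fuel (k : Int) ((m : Int) - 1) 0) t5
  pvOut t6

-- ===== PORT B =====
-- line(y, x, dy, dx): the cells of one line, walked while in bounds
def pvLine (board : List (List String)) (d_y d_x : Int) : Nat → Int → Int → List String
  | 0, _, _ => []
  | fuel + 1, y, x =>
    if 0 ≤ y ∧ y < (board.length : Int) ∧ 0 ≤ x ∧ x < pvRowLen board then
      pvCell board y x :: pvLine board d_y d_x fuel (y + d_y) (x + d_x)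
    else []

-- per-line run scan; prev = cell just before the current position (none = off the line)
def pvScanGo (col : String) (length : Int) : Option String → List String → Int × Int × Int
  | _, [] => (0, 0, 0)
  | prev, c :: rest =>
    if c = col then
      let tail := rest.dropWhile (fun s => s == col)
      let run : Int := 1 + (rest.takeWhile (fun s => s == col)).length
      let after : Option String := tail.head?
      let inc : Int × Int × Int :=
        if length < run then (0, 0, 1)
        else if run = length then
          if prev = some " " ∧ after = some " " then (1, 0, 0)
          else if prev = some " " ∨ after = some " " then (0, 1, 0)
          else (0, 0, 1)
        else (0, 0, 0)
      inc + pvScanGo col length (some col) tail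
    else pvScanGo col length (some c) rest
  termination_by _ cells => cells.length
  decreasing_by
    · simp only [List.length_cons]
      exact Nat.lt_succ_of_le (List.length_dropWhile_le _ _)
    · simp

def better_detect_rows_alt (board : List (List String)) (col : String) (length : Int) : List Int :=
  if length < 1 then [0, 0, 0]
  else
    let m := (PySem.List.pyGetD board 0 ([] : List String)).length
    let fuel := board.length + m + 1
    let lines : List (List String) :=
      (List.range board.length).map (fun (i : Nat) => pvLine board 1 0 fuel 0 (i : Int)) ++
      (List.range board.length).map (fun (i : Nat) => pvLine board 0 1 fuel (i : Int) 0) ++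
      (List.range m).map (fun (i : Nat) => pvLine board 1 1 fuel 0 (i : Int)) ++
      (List.range' 1 (board.length - 1)).map (fun (k : Nat) => pvLine board 1 1 fuel (k : Int) 0) ++
      (List.range m).map (fun (i : Nat) => pvLine board 1 (-1) fuel 0 (i : Int)) ++
      (List.range' 1 (board.length - 1)).map (fun (k : Nat) => pvLine board 1 (-1) fuel (k : Int) ((m : Int) - 1))
    let t := lines.foldl (fun acc cells => acc + pvScanGo col length none cells)
      ((0, 0, 0) : Int × Int × Int)
    pvOut t

-- ===== PRECONDITION & SPEC =====
-- Pre_ excludes (a) inputs where A raises IndexError: the empty board and boards with a row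
-- shorter than row 0; and (b) col = "edge", where A's in-band out-of-board sentinel collides
-- with the stone colour so A's classification of a boundary run is an accident of its
-- implementation (A counts it closed where B counts a space side as open).
def Pre_better_detect_rows (board : List (List String)) (col : String) (length : Int) : Prop :=
  board ≠ [] ∧ (∀ row ∈ board, (board.headD []).length ≤ row.length) ∧ col ≠ "edge"
instance (board : List (List String)) (col : String) (length : Int) : Decidable (Pre_better_detect_rows board col length) := by unfold Pre_better_detect_rows; infer_instance

def pvWitness_better_detect_rows : List (List String) × String × Int :=
  ([[" ", "b"], ["b", " "]], "b", 1)

def Spec_better_detect_rows (board : List (List String)) (col : String) (length : Int) (out : List Int) : Prop := out = better_detect_rows_alt board col length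
instance (board : List (List String)) (col : String) (length : Int) (out : List Int) : Decidable (Spec_better_detect_rows board col length out) := by unfold Spec_better_detect_rows; infer_instance

-- ===== CLAIM (what is proved, stated in full; the proofs are below) =====
def Claim_equal_better_detect_rows : Prop := ∀ (board : List (List String)) (col : String) (length : Int), Dom_better_detect_rows board col length → Pre_better_detect_rows board col length → Spec_better_detect_rows board col length (better_detect_rows board col length)

-- ===== LEMMAS AND PROOFS =====

-- triple arithmetic helpers
theorem triple_zero_add (x : Int × Int × Int) : ((0, 0, 0) : Int × Int × Int) + x = x := by
  obtain ⟨a, b, c⟩ := x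
  simp [Prod.mk_add_mk]

theorem triple_add_zero (x : Int × Int × Int) : x + ((0, 0, 0) : Int × Int × Int) = x := by
  obtain ⟨a, b, c⟩ := x
  simp [Prod.mk_add_mk]

-- the current position is inside the board
def pvInB (board : List (List String)) (y x : Int) : Prop :=
  0 ≤ y ∧ y < (board.length : Int) ∧ 0 ≤ x ∧ x < pvRowLen board

-- b records the cell at a given position: none = off the board, some v = in board with value v
def pvMatch (board : List (List String)) (b : Option String) (y x : Int) : Prop :=
  match b with
  | none => ¬ pvInB board y x
  | some v => pvInB board y x ∧ pvCell board y x = v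

-- the fuel outlasts the walk (holds for every direction better_detect_rows uses)
def pvHd (board : List (List String)) (d_y d_x y x : Int) (fuel : Nat) : Prop :=
  (d_y = 1 ∧ (board.length : Int) ≤ y + fuel) ∨ (d_y = 0 ∧ d_x = 1 ∧ pvRowLen board ≤ x + fuel)

-- is_bounded's classification as a function of the two neighbour values
def boundedOf (st en col : String) : Option String :=
  if st = col ∨ en = col then none
  else if st = " " ∧ en = " " then some "OPEN"
  else if st = " " ∨ en = " " then some "SEMIOPEN"
  else some "CLOSED"

-- the (open, semiopen, closed) increment A adds at a hit, from the two neighbours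
def cInc (col : String) (b a : Option String) : Int × Int × Int :=
  if boundedOf (b.getD "edge") (a.getD "edge") col = some "OPEN" then (1, 0, 0)
  else if boundedOf (b.getD "edge") (a.getD "edge") col = some "SEMIOPEN" then (0, 1, 0)
  else (0, 0, 1)

-- A's loop rephrased on the line's cell list (b = cell preceding the pending run)
def listRow (col : String) (length : Int) : List String → Int → Option String → Int × Int × Int
  | [], _, _ => (0, 0, 0)
  | c :: rest, sl, b =>
    if c = col then
      (if sl + 1 = length then cInc col b rest.head? else (0, 0, 0))
        + listRow col length rest (sl + 1) b
    else listRow col length rest 0 (some c)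

-- total increment contributed by a block of j consecutive col-cells entered with counter sl
def fH (col : String) (length sl : Int) (j : Nat) (b a : Option String) : Int × Int × Int :=
  if sl < length ∧ length ≤ sl + (j : Int) then
    (if sl + (j : Int) = length then cInc col b a else (0, 0, 1))
  else (0, 0, 0)

theorem pvHd_zero (board : List (List String)) (d_y d_x y x : Int)
    (h : pvHd board d_y d_x y x 0) : ¬ pvInB board y x := by
  unfold pvHd at h
  unfold pvInB
  push_cast at h
  omega

theorem pvHd_step (board : List (List String)) (d_y d_x y x : Int) (fuel : Nat)
    (h : pvHd board d_y d_x y x (fuel + 1)) : pvHd board d_y d_x (y + d_y) (x + d_x) fuel := by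
  unfold pvHd at h ⊢
  push_cast at h ⊢
  rcases h with ⟨h1, h2⟩ | ⟨h1, h2, h3⟩
  · left; subst h1; exact ⟨rfl, by omega⟩
  · right; subst h1; subst h2; exact ⟨rfl, rfl, by omega⟩

theorem line_nil (board : List (List String)) (d_y d_x : Int) (fuel : Nat) (y x : Int)
    (h : ¬ pvInB board y x) : pvLine board d_y d_x fuel y x = [] := by
  cases fuel with
  | zero => rfl
  | succ n =>
    unfold pvInB at h
    simp only [pvLine]
    rw [if_neg h]

theorem line_head (board : List (List String)) (d_y d_x : Int) (fuel : Nat) (y x : Int)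
    (hHd : pvHd board d_y d_x y x fuel) (hIn : pvInB board y x) :
    (pvLine board d_y d_x fuel y x).head? = some (pvCell board y x) := by
  cases fuel with
  | zero => exact absurd hIn (pvHd_zero board d_y d_x y x hHd)
  | succ n =>
    have hIn' : 0 ≤ y ∧ y < (board.length : Int) ∧ 0 ≤ x ∧ x < pvRowLen board := hIn
    simp only [pvLine]
    rw [if_pos hIn']
    rfl

theorem isBounded_eq (board : List (List String)) (col : String) (length d_y d_x y x sl : Int)
    (b : Option String) (fuel : Nat)
    (hHd : pvHd board d_y d_x (y + d_y) (x + d_x) fuel)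
    (hb : pvMatch board b (y - (sl + 1) * d_y) (x - (sl + 1) * d_x))
    (hc : pvCell board y x = col) (hlen : sl + 1 = length) :
    pvIsBounded board y x length d_y d_x
      = boundedOf (b.getD "edge")
          (((pvLine board d_y d_x fuel (y + d_y) (x + d_x)).head?).getD "edge") col := by
  subst hlen
  simp only [pvIsBounded]
  rw [show y - d_y * (sl + 1 - 1) - d_y = y - (sl + 1) * d_y from by ring,
      show x - d_x * (sl + 1 - 1) - d_x = x - (sl + 1) * d_x from by ring, hc]
  have hend : (if y + d_y < 0 ∨ y + d_y ≥ (board.length : Int) ∨ x + d_x < 0 ∨ x + d_x ≥ pvRowLen board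
      then "edge" else pvCell board (y + d_y) (x + d_x))
      = ((pvLine board d_y d_x fuel (y + d_y) (x + d_x)).head?).getD "edge" := by
    by_cases hn : pvInB board (y + d_y) (x + d_x)
    · rw [if_neg (by unfold pvInB at hn; omega), line_head board d_y d_x fuel _ _ hHd hn]
      rfl
    · rw [if_pos (by unfold pvInB at hn; omega), line_nil board d_y d_x fuel _ _ hn]
      rfl
  have hstart : (if y - (sl + 1) * d_y < 0 ∨ y - (sl + 1) * d_y ≥ (board.length : Int) ∨
        x - (sl + 1) * d_x < 0 ∨ x - (sl + 1) * d_x ≥ pvRowLen board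
      then "edge" else pvCell board (y - (sl + 1) * d_y) (x - (sl + 1) * d_x)) = b.getD "edge" := by
    match b, hb with
    | none, hb =>
      have hb' : ¬ pvInB board (y - (sl + 1) * d_y) (x - (sl + 1) * d_x) := hb
      rw [if_pos (by unfold pvInB at hb'; omega)]
      rfl
    | some v, ⟨hin, hcell⟩ => rw [if_neg (by unfold pvInB at hin; omega), hcell]; rfl
  rw [hend, hstart]
  rfl

-- GEOMETRY: A's board walk equals listRow over the gathered line
theorem row_eq (board : List (List String)) (col : String) (length d_y d_x : Int) :
    ∀ (fuel : Nat) (y x sl : Int) (b : Option String),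
      pvHd board d_y d_x y x fuel →
      pvMatch board b (y - (sl + 1) * d_y) (x - (sl + 1) * d_x) →
      pvRow board col length d_y d_x fuel y x sl
        = listRow col length (pvLine board d_y d_x fuel y x) sl b := by
  intro fuel
  induction fuel with
  | zero => intro y x sl b _ _; rfl
  | succ n ih =>
    intro y x sl b hHd hb
    have hHd' := pvHd_step board d_y d_x y x n hHd
    by_cases hin : 0 ≤ y ∧ y < (board.length : Int) ∧ 0 ≤ x ∧ x < pvRowLen board
    · simp only [pvRow, pvLine]
      rw [if_pos hin, if_pos hin]
      by_cases hc : pvCell board y x = col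
      · rw [if_pos hc]
        simp only [listRow]
        rw [if_pos hc]
        have hb' : pvMatch board b ((y + d_y) - ((sl + 1) + 1) * d_y) ((x + d_x) - ((sl + 1) + 1) * d_x) := by
          rw [show (y + d_y) - ((sl + 1) + 1) * d_y = y - (sl + 1) * d_y from by ring,
              show (x + d_x) - ((sl + 1) + 1) * d_x = x - (sl + 1) * d_x from by ring]
          exact hb
        congr 1
        · by_cases hsl : sl + 1 = length
          · rw [if_pos hsl, if_pos hsl,
              isBounded_eq board col length d_y d_x y x sl b n hHd' hb hc hsl]
            rfl
          · rw [if_neg hsl, if_neg hsl]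
        · exact ih (y + d_y) (x + d_x) (sl + 1) b hHd' hb'
      · rw [if_neg hc]
        simp only [listRow]
        rw [if_neg hc]
        have hb0 : pvMatch board (some (pvCell board y x)) ((y + d_y) - (0 + 1) * d_y) ((x + d_x) - (0 + 1) * d_x) := by
          rw [show (y + d_y) - (0 + 1) * d_y = y from by ring,
              show (x + d_x) - (0 + 1) * d_x = x from by ring]
          exact ⟨hin, rfl⟩
        exact ih (y + d_y) (x + d_x) 0 (some (pvCell board y x)) hHd' hb0
    · simp only [pvRow, pvLine]
      rw [if_neg hin, if_neg hin]
      rfl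

theorem cInc_some_col (col : String) (b : Option String) : cInc col b (some col) = (0, 0, 1) := by
  simp [cInc, boundedOf]

-- classification agrees with B's option-valued comparisons when no neighbour is col
theorem cInc_eq (col : String) (hcol : col ≠ "edge") (b a : Option String)
    (hb : ∀ v, b = some v → v ≠ col) (ha : ∀ v, a = some v → v ≠ col) :
    cInc col b a = (if b = some " " ∧ a = some " " then ((1, 0, 0) : Int × Int × Int)
      else if b = some " " ∨ a = some " " then (0, 1, 0) else (0, 0, 1)) := by
  have hedge : ("edge" : String) ≠ col := fun h => hcol h.symm
  cases b with
  | none =>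
    cases a with
    | none => simp [cInc, boundedOf, hedge]
    | some w =>
      have hw : w ≠ col := ha w rfl
      by_cases hws : w = " "
      · subst hws; simp [cInc, boundedOf, hedge, hw]
      · simp [cInc, boundedOf, hedge, hw, hws]
  | some v =>
    have hv : v ≠ col := hb v rfl
    cases a with
    | none =>
      by_cases hvs : v = " "
      · subst hvs; simp [cInc, boundedOf, hedge, hv]
      · simp [cInc, boundedOf, hedge, hv, hvs]
    | some w =>
      have hw : w ≠ col := ha w rfl
      by_cases hvs : v = " " <;> by_cases hws : w = " "
      · subst hvs; subst hws; simp [cInc, boundedOf, hv]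
      · subst hvs; simp [cInc, boundedOf, hv, hw, hws]
      · subst hws; simp [cInc, boundedOf, hv, hw, hvs]
      · simp [cInc, boundedOf, hv, hw, hvs, hws]

-- RUN: listRow over a block of col-cells contributes fH
theorem listRow_run (col : String) (length : Int) (tail : List String) :
    ∀ (u : List String) (sl : Int) (b : Option String), (∀ s ∈ u, s = col) →
      listRow col length (u ++ tail) sl b
        = fH col length sl u.length b tail.head?
          + listRow col length tail (sl + (u.length : Int)) b := by
  intro u
  induction u with
  | nil =>
    intro sl b _
    simp only [List.nil_append, List.length_nil, Nat.cast_zero, add_zero]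
    rw [fH]
    rw [if_neg (by omega : ¬(sl < length ∧ length ≤ sl + ((0 : Nat) : Int)))]
    rw [triple_zero_add]
  | cons c u' ihu =>
    intro sl b hall
    have hc : c = col := hall c (by simp)
    have hall' : ∀ s ∈ u', s = col := fun s hs => hall s (by simp [hs])
    simp only [List.cons_append, List.length_cons, listRow]
    rw [if_pos hc, ihu (sl + 1) b hall', ← add_assoc,
        show sl + ((u'.length + 1 : Nat) : Int) = (sl + 1) + (u'.length : Int) from by push_cast; ring]
    congr 1
    cases u' with
    | nil =>
      simp only [List.nil_append, List.length_nil]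
      by_cases hsl : sl + 1 = length
      · rw [if_pos hsl]
        unfold fH
        rw [if_neg (by push_cast; omega), triple_add_zero,
            if_pos (by push_cast; omega), if_pos (by push_cast; omega)]
      · rw [if_neg hsl]
        unfold fH
        rw [triple_zero_add, if_neg (by push_cast; omega), if_neg (by push_cast; omega)]
    | cons s u'' =>
      have hs : s = col := hall' s (by simp)
      simp only [List.cons_append, List.head?_cons, hs, List.length_cons]
      rw [cInc_some_col]
      by_cases hsl : sl + 1 = length
      · rw [if_pos hsl]
        unfold fH
        rw [if_neg (by push_cast; omega), triple_add_zero,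
            if_pos (by push_cast; omega), if_neg (by push_cast; omega)]
      · rw [if_neg hsl]
        unfold fH
        rw [triple_zero_add]
        split_ifs <;> first | rfl | (exfalso; push_cast at *; omega)

-- head of dropWhile falsifies the predicate (direct cons form used below)
theorem dropWhile_head_false {α : Type} (p : α → Bool) :
    ∀ (l : List α) (t : α) (ts : List α), l.dropWhile p = t :: ts → p t = false := by
  intro l
  induction l with
  | nil => intro t ts h; cases h
  | cons a l' ihl =>
    intro t ts h
    cases hpa : p a
    · rw [List.dropWhile_cons_of_neg (by simp [hpa])] at h
      cases h
      exact hpa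
    · rw [List.dropWhile_cons_of_pos (by simp [hpa])] at h
      exact ihl t ts h

-- LIST: listRow from a fresh state equals B's run scan
theorem scan_eq (col : String) (length : Int) (hl : 1 ≤ length) (hcol : col ≠ "edge") :
    ∀ (N : Nat) (cells : List String), cells.length ≤ N →
      ∀ (b : Option String), (∀ v, b = some v → v ≠ col) →
        listRow col length cells 0 b = pvScanGo col length b cells := by
  intro N
  induction N with
  | zero =>
    intro cells hle b _
    cases cells with
    | nil => simp only [listRow, pvScanGo]
    | cons c rest => exact absurd hle (by simp)
  | succ N ih =>
    intro cells hle b hb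
    cases cells with
    | nil => simp only [listRow, pvScanGo]
    | cons c rest =>
      have hrest : rest.length ≤ N := by
        simp only [List.length_cons] at hle
        omega
      by_cases hc : c = col
      · have hsplit : rest.takeWhile (fun s => s == col) ++ rest.dropWhile (fun s => s == col) = rest :=
          List.takeWhile_append_dropWhile
        have hall : ∀ s ∈ c :: rest.takeWhile (fun s => s == col), s = col := by
          intro s hs
          rcases List.mem_cons.mp hs with rfl | hs
          · exact hc
          · simpa using List.mem_takeWhile_imp hs
        have hav : ∀ v, (rest.dropWhile (fun s => s == col)).head? = some v → v ≠ col := by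
          intro v hv
          cases htl : rest.dropWhile (fun s => s == col) with
          | nil => rw [htl] at hv; cases hv
          | cons t ts =>
            rw [htl] at hv
            injection hv with hv
            have hpt := dropWhile_head_false (fun s => s == col) rest t ts htl
            rw [← hv]
            simpa using hpt
        have hL : listRow col length (c :: rest) 0 b
            = fH col length 0 ((c :: rest.takeWhile (fun s => s == col)).length) b
                (rest.dropWhile (fun s => s == col)).head?
              + listRow col length (rest.dropWhile (fun s => s == col))
                  (0 + (((c :: rest.takeWhile (fun s => s == col)).length : Nat) : Int)) b := by
          have h := listRow_run col length (rest.dropWhile (fun s => s == col))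
            (c :: rest.takeWhile (fun s => s == col)) 0 b hall
          rw [show (c :: rest.takeWhile (fun s => s == col)) ++ rest.dropWhile (fun s => s == col)
            = c :: rest from by rw [List.cons_append, hsplit]] at h
          exact h
        rw [hL]
        simp only [pvScanGo]
        rw [if_pos hc]
        congr 1
        · -- the hit contribution equals B's increment for this run
          rw [List.length_cons]
          unfold fH
          rw [cInc_eq col hcol b (rest.dropWhile (fun s => s == col)).head? hb hav]
          split_ifs <;> first | rfl | (exfalso; push_cast at *; omega)
        · -- the continuation
          cases htl : rest.dropWhile (fun s => s == col) with
          | nil => simp only [listRow, pvScanGo]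
          | cons t ts =>
            have ht : t ≠ col := by
              have := dropWhile_head_false (fun s => s == col) rest t ts htl
              simpa using this
            simp only [listRow, pvScanGo]
            rw [if_neg ht, if_neg ht]
            refine ih ts ?_ (some t) (fun v hv => by cases hv; exact ht)
            have h1 : (rest.dropWhile (fun s => s == col)).length ≤ rest.length :=
              List.length_dropWhile_le _ _
            rw [htl] at h1
            simp only [List.length_cons] at h1
            omega
      · simp only [listRow, pvScanGo]
        rw [if_neg hc, if_neg hc]
        exact ih rest hrest (some c) (fun v hv => by cases hv; exact hc)

-- one full line, from each of the six start families
theorem family_eq (board : List (List String)) (col : String) (length : Int)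
    (hl : 1 ≤ length) (hcol : col ≠ "edge") (d_y d_x ys xs : Int) (fuel : Nat)
    (hHd : pvHd board d_y d_x ys xs fuel)
    (hstart : ¬ pvInB board (ys - d_y) (xs - d_x)) :
    pvRow board col length d_y d_x fuel ys xs 0
      = pvScanGo col length none (pvLine board d_y d_x fuel ys xs) := by
  rw [row_eq board col length d_y d_x fuel ys xs 0 none hHd ?hm]
  · exact scan_eq col length hl hcol (pvLine board d_y d_x fuel ys xs).length _ le_rfl none
      (fun v hv => nomatch hv)
  case hm =>
    show ¬ pvInB board (ys - (0 + 1) * d_y) (xs - (0 + 1) * d_x)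
    rw [show ys - (0 + 1) * d_y = ys - d_y from by ring,
        show xs - (0 + 1) * d_x = xs - d_x from by ring]
    exact hstart

-- when length < 1, A never counts anything
theorem pvRow_zero (board : List (List String)) (col : String) (length d_y d_x : Int)
    (hl : length < 1) :
    ∀ (fuel : Nat) (y x sl : Int), 0 ≤ sl →
      pvRow board col length d_y d_x fuel y x sl = (0, 0, 0) := by
  intro fuel
  induction fuel with
  | zero => intro y x sl _; rfl
  | succ n ihn =>
    intro y x sl hsl
    simp only [pvRow]
    by_cases hg : 0 ≤ y ∧ y < (board.length : Int) ∧ 0 ≤ x ∧ x < pvRowLen board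
    · rw [if_pos hg]
      by_cases hc : pvCell board y x = col
      · rw [if_pos hc, if_neg (by omega : ¬(sl + 1 = length)), triple_zero_add]
        exact ihn (y + d_y) (x + d_x) (sl + 1) (by omega)
      · rw [if_neg hc]
        exact ihn (y + d_y) (x + d_x) 0 le_rfl
    · rw [if_neg hg]

-- fold helpers
theorem foldl_add_triv {α : Type} :
    ∀ (l : List α) (F : α → Int × Int × Int) (a t : Int × Int × Int),
      (∀ i ∈ l, F i = (0, 0, 0)) → a = t →
      l.foldl (fun acc i => acc + F i) a = t := by
  intro l
  induction l with
  | nil => intro F a t _ hinit; simpa using hinit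
  | cons i l' ihl =>
    intro F a t h hinit
    simp only [List.foldl_cons]
    exact ihl F _ t (fun j hj => h j (by simp [hj]))
      (by rw [h i (by simp), triple_add_zero, hinit])

theorem foldl_add_eq {α : Type} :
    ∀ (l : List α) (F G : α → Int × Int × Int) (a b : Int × Int × Int),
      (∀ i ∈ l, F i = G i) → a = b →
      l.foldl (fun acc i => acc + F i) a = l.foldl (fun acc i => acc + G i) b := by
  intro l
  induction l with
  | nil => intro F G a b _ hab; simpa using hab
  | cons i l' ihl =>
    intro F G a b h hab
    simp only [List.foldl_cons]
    exact ihl F G _ _ (fun j hj => h j (by simp [hj]))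
      (by rw [hab, h i (by simp)])

-- ===== VERDICT (by name: the statement is the Claim_ definition above) =====
theorem better_detect_rows_spec : Claim_equal_better_detect_rows := by
  intro board col length _hDom hPre
  obtain ⟨_hne, _hrows, hcol⟩ := hPre
  unfold Spec_better_detect_rows
  by_cases hl : length < 1
  · simp only [better_detect_rows, better_detect_rows_alt]
    rw [if_pos hl]
    trans pvOut ((0, 0, 0) : Int × Int × Int)
    · apply congrArg pvOut
      apply foldl_add_triv
      · intro k _; exact pvRow_zero board col length _ _ hl _ _ _ 0 le_rfl
      apply foldl_add_triv
      · intro i _; exact pvRow_zero board col length _ _ hl _ _ _ 0 le_rfl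
      apply foldl_add_triv
      · intro k _; exact pvRow_zero board col length _ _ hl _ _ _ 0 le_rfl
      apply foldl_add_triv
      · intro i _; exact pvRow_zero board col length _ _ hl _ _ _ 0 le_rfl
      apply foldl_add_triv
      · intro i _; exact pvRow_zero board col length _ _ hl _ _ _ 0 le_rfl
      apply foldl_add_triv
      · intro i _; exact pvRow_zero board col length _ _ hl _ _ _ 0 le_rfl
      rfl
    · rfl
  · have hl1 : 1 ≤ length := by omega
    simp only [better_detect_rows, better_detect_rows_alt, List.foldl_append, List.foldl_map]
    rw [if_neg hl]
    apply congrArg pvOut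
    apply foldl_add_eq
    · intro k _
      exact family_eq board col length hl1 hcol 1 (-1) ((k : Int)) (((PySem.List.pyGetD board 0 ([] : List String)).length : Int) - 1) (board.length + (PySem.List.pyGetD board 0 ([] : List String)).length + 1)
        (Or.inl ⟨rfl, by push_cast; omega⟩)
        (by unfold pvInB pvRowLen; omega)
    apply foldl_add_eq
    · intro i _
      exact family_eq board col length hl1 hcol 1 (-1) (0) ((i : Int)) (board.length + (PySem.List.pyGetD board 0 ([] : List String)).length + 1)
        (Or.inl ⟨rfl, by push_cast; omega⟩)
        (by unfold pvInB pvRowLen; omega)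
    apply foldl_add_eq
    · intro k _
      exact family_eq board col length hl1 hcol 1 1 ((k : Int)) (0) (board.length + (PySem.List.pyGetD board 0 ([] : List String)).length + 1)
        (Or.inl ⟨rfl, by push_cast; omega⟩)
        (by unfold pvInB pvRowLen; omega)
    apply foldl_add_eq
    · intro i _
      exact family_eq board col length hl1 hcol 1 1 (0) ((i : Int)) (board.length + (PySem.List.pyGetD board 0 ([] : List String)).length + 1)
        (Or.inl ⟨rfl, by push_cast; omega⟩)
        (by unfold pvInB pvRowLen; omega)
    apply foldl_add_eq
    · intro i _
      exact family_eq board col length hl1 hcol 0 1 ((i : Int)) (0) (board.length + (PySem.List.pyGetD board 0 ([] : List String)).length + 1)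
        (Or.inr ⟨rfl, rfl, by unfold pvRowLen; push_cast; omega⟩)
        (by unfold pvInB pvRowLen; omega)
    apply foldl_add_eq
    · intro i _
      exact family_eq board col length hl1 hcol 1 0 (0) ((i : Int)) (board.length + (PySem.List.pyGetD board 0 ([] : List String)).length + 1)
        (Or.inl ⟨rfl, by push_cast; omega⟩)
        (by unfold pvInB pvRowLen; omega)
    rfl
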